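-- pv_equiv track=rewrite | github.com/sanjaybasu/interpretability-triage | 22_logit_lens.py | classify_cases
-- ===== SOURCE A (Python) =====
-- def classify_cases(results):
--     """Partition cases into TP, FN, TN, FP indices."""
--     tp, fn, tn, fp = [], [], [], []
--     for i, r in enumerate(results):
--         truth = r["detection_truth"]
--         pred = r.get("gemma2_detection", r.get("detection_pred", 0))
--         if truth == 1 and pred == 1:
--             tp.append(i)
--         elif truth == 1 and pred == 0:
--             fn.append(i)
--         elif truth == 0 and pred == 0:
--             tn.append(i)
--         else:
--             fp.append(i)
--     return {"tp": tp, "fn": fn, "tn": tn, "fp": fp}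
-- ===== SOURCE B (Python) =====
-- def classify_cases(results):
--     """Partition cases into TP, FN, TN, FP indices (four independent scans)."""
--     def truth(r):
--         return r["detection_truth"]
--
--     def pred(r):
--         return r.get("gemma2_detection", r.get("detection_pred", 0))
--
--     tp = [i for i, r in enumerate(results) if truth(r) == 1 and pred(r) == 1]
--     fn = [i for i, r in enumerate(results) if truth(r) == 1 and pred(r) == 0]
--     tn = [i for i, r in enumerate(results) if truth(r) == 0 and pred(r) == 0]
--     # fp is the complement of the other three buckets (A's catch-all else).
--     fp = [i for i, r in enumerate(results)
--           if not ((truth(r) == 1 and pred(r) == 1)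
--                   or (truth(r) == 1 and pred(r) == 0)
--                   or (truth(r) == 0 and pred(r) == 0))]
--     return {"tp": tp, "fn": fn, "tn": tn, "fp": fp}
-- ===== Notes on version B (the rewrite author's own statement) =====
-- stated objective: alternative
-- what changed: A's single stateful loop with four accumulators is replaced by four independent list comprehensions over enumerate(results), with the FP bucket defined as the complement of the other three conditions to keep the catch-all else semantics.
import Mathlib
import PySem

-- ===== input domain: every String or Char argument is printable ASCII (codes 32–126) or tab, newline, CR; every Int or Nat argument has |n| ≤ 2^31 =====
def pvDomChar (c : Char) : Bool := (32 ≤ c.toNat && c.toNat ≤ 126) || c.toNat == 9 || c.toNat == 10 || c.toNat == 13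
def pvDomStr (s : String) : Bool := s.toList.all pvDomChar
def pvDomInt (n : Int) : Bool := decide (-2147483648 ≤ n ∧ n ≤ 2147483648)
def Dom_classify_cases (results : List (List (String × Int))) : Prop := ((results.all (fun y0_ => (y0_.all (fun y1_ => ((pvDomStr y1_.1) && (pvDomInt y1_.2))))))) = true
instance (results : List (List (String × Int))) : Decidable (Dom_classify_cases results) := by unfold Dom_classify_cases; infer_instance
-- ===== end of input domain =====

-- B replaces A's single stateful loop by four independent comprehension scans; same cost, no side effects.

-- shared dict-access helpers (first-match association-list lookup = Python dict lookup)
-- r["detection_truth"]; the 'none' (KeyError) case is excluded by Pre_, getD 0 is never used inside Pre_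
def pvTruth (r : List (String × Int)) : Int := (List.lookup "detection_truth" r).getD 0
-- r.get("gemma2_detection", r.get("detection_pred", 0)) — total in Python
def pvPred (r : List (String × Int)) : Int :=
  (List.lookup "gemma2_detection" r).getD ((List.lookup "detection_pred" r).getD 0)

-- ===== PORT A =====
def classify_cases (results : List (List (String × Int))) : List (String × List Int) :=
  let s := (PySem.List.enumerate results).foldl
    (fun (acc : List Int × List Int × List Int × List Int) ir =>
      let i := ir.1
      let truth := pvTruth ir.2
      let pred := pvPred ir.2
      if truth == 1 && pred == 1 then (acc.1 ++ [i], acc.2.1, acc.2.2.1, acc.2.2.2)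
      else if truth == 1 && pred == 0 then (acc.1, acc.2.1 ++ [i], acc.2.2.1, acc.2.2.2)
      else if truth == 0 && pred == 0 then (acc.1, acc.2.1, acc.2.2.1 ++ [i], acc.2.2.2)
      else (acc.1, acc.2.1, acc.2.2.1, acc.2.2.2 ++ [i]))
    ([], [], [], [])
  [("tp", s.1), ("fn", s.2.1), ("tn", s.2.2.1), ("fp", s.2.2.2)]

-- ===== PORT B =====
-- one comprehension [i for i, r in enumerate(results) if p(truth(r), pred(r))]
def pvBucket (results : List (List (String × Int))) (p : Int → Int → Bool) : List Int :=
  (PySem.List.enumerate results).filterMap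
    (fun ir => if p (pvTruth ir.2) (pvPred ir.2) then some ir.1 else none)

def classify_cases_alt (results : List (List (String × Int))) : List (String × List Int) :=
  [("tp", pvBucket results (fun t p => t == 1 && p == 1)),
   ("fn", pvBucket results (fun t p => t == 1 && p == 0)),
   ("tn", pvBucket results (fun t p => t == 0 && p == 0)),
   ("fp", pvBucket results (fun t p =>
      !((t == 1 && p == 1) || (t == 1 && p == 0) || (t == 0 && p == 0))))]

-- ===== PRECONDITION & SPEC =====
-- Pre_: every record has the key "detection_truth" (else Python A raises KeyError)
def Pre_classify_cases (results : List (List (String × Int))) : Prop :=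
  (results.all (fun r => (List.lookup "detection_truth" r).isSome)) = true
instance (results : List (List (String × Int))) : Decidable (Pre_classify_cases results) := by
  unfold Pre_classify_cases; infer_instance
def pvWitness_classify_cases : (List (List (String × Int))) :=
  [[("detection_truth", 1), ("gemma2_detection", 1)], [("detection_truth", 0)]]

def Spec_classify_cases (results : List (List (String × Int))) (out : List (String × List Int)) : Prop := out = classify_cases_alt results
instance (results : List (List (String × Int))) (out : List (String × List Int)) : Decidable (Spec_classify_cases results out) := by unfold Spec_classify_cases; infer_instance

-- ===== CLAIM (what is proved, stated in full; the proofs are below) =====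
def Claim_equal_classify_cases : Prop := ∀ (results : List (List (String × Int))), Dom_classify_cases results → Pre_classify_cases results → Spec_classify_cases results (classify_cases results)

-- ===== LEMMAS AND PROOFS =====

-- loop invariant: A's fold extends each accumulator by the corresponding filtered scan
theorem pvLoop_eq (l : List (Int × List (String × Int))) :
    ∀ (a b c d : List Int),
      l.foldl
        (fun (acc : List Int × List Int × List Int × List Int) ir =>
          let i := ir.1
          let truth := pvTruth ir.2
          let pred := pvPred ir.2
          if truth == 1 && pred == 1 then (acc.1 ++ [i], acc.2.1, acc.2.2.1, acc.2.2.2)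
          else if truth == 1 && pred == 0 then (acc.1, acc.2.1 ++ [i], acc.2.2.1, acc.2.2.2)
          else if truth == 0 && pred == 0 then (acc.1, acc.2.1, acc.2.2.1 ++ [i], acc.2.2.2)
          else (acc.1, acc.2.1, acc.2.2.1, acc.2.2.2 ++ [i]))
        (a, b, c, d)
      = (a ++ l.filterMap (fun ir => if pvTruth ir.2 == 1 && pvPred ir.2 == 1 then some ir.1 else none),
         b ++ l.filterMap (fun ir => if pvTruth ir.2 == 1 && pvPred ir.2 == 0 then some ir.1 else none),
         c ++ l.filterMap (fun ir => if pvTruth ir.2 == 0 && pvPred ir.2 == 0 then some ir.1 else none),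
         d ++ l.filterMap (fun ir =>
           if !((pvTruth ir.2 == 1 && pvPred ir.2 == 1) || (pvTruth ir.2 == 1 && pvPred ir.2 == 0)
                || (pvTruth ir.2 == 0 && pvPred ir.2 == 0)) then some ir.1 else none)) := by
  induction l with
  | nil => intro a b c d; simp
  | cons hd tl ih =>
      intro a b c d
      simp only [List.foldl_cons]
      split_ifs with h1 h2 h3
      · simp only [Bool.and_eq_true, beq_iff_eq] at h1
        rw [ih]
        simp only [List.filterMap_cons]
        simp [h1.1, h1.2]
      · simp only [Bool.and_eq_true, beq_iff_eq] at h2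
        rw [ih]
        simp only [List.filterMap_cons]
        simp [h2.1, h2.2]
      · simp only [Bool.and_eq_true, beq_iff_eq] at h3
        rw [ih]
        simp only [List.filterMap_cons]
        simp [h3.1, h3.2]
      · simp only [Bool.and_eq_true, beq_iff_eq, not_and] at h1 h2 h3
        rw [ih]
        simp only [List.filterMap_cons]
        have c1 : (pvTruth hd.2 == 1 && pvPred hd.2 == 1) = false := by
          by_cases ht : pvTruth hd.2 = 1 <;> by_cases hp : pvPred hd.2 = 1 <;>
            simp_all
        have c2 : (pvTruth hd.2 == 1 && pvPred hd.2 == 0) = false := by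
          by_cases ht : pvTruth hd.2 = 1 <;> by_cases hp : pvPred hd.2 = 0 <;>
            simp_all
        have c3 : (pvTruth hd.2 == 0 && pvPred hd.2 == 0) = false := by
          by_cases ht : pvTruth hd.2 = 0 <;> by_cases hp : pvPred hd.2 = 0 <;>
            simp_all
        simp [c1, c2, c3]

-- ===== VERDICT (by name: the statement is the Claim_ definition above) =====
theorem classify_cases_spec : Claim_equal_classify_cases := by
  intro results _ _
  unfold Spec_classify_cases classify_cases classify_cases_alt pvBucket
  rw [pvLoop_eq]
  simp
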